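-- pv_equiv track=rewrite | github.com/zagara2/TopCoderSolutions | MemberCheck/MemberCheck.py | whosDishonest
-- ===== SOURCE A (Python) =====
-- def whosDishonest(club1, club2, club3):
--     club1 = set(club1)
--     club2 = set(club2)
--     club3 = set(club3)
--     memberdict = {}
--     for person in club1:
--         if person not in memberdict:
--             memberdict[person] = ["club1"]
--     for person in club2:
--         if person not in memberdict:
--             memberdict[person] = ["club2"]
--         else:
--             memberdict[person].append("club2")
--     for person in club3:
--         if person not in memberdict:
--             memberdict[person] = ["club3"]
--         else:
--             memberdict[person].append("club3")
--     blanklist = []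
--     for (k, v) in sorted(memberdict.items()):
--         if len(v)>1:
--             blanklist.append(k)
--     return blanklist
-- ===== SOURCE B (Python) =====
-- def whosDishonest(club1, club2, club3):
--     s1, s2, s3 = set(club1), set(club2), set(club3)
--     return sorted((s1 & s2) | (s1 & s3) | (s2 & s3))
-- ===== Notes on version B (the rewrite author's own statement) =====
-- stated objective: simpler
-- what changed: Replaces A's person-to-club-list dictionary counting pass (three dict-building loops plus a sorted-items scan) with plain set algebra: the union of the three pairwise intersections, sorted.
import Mathlib
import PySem

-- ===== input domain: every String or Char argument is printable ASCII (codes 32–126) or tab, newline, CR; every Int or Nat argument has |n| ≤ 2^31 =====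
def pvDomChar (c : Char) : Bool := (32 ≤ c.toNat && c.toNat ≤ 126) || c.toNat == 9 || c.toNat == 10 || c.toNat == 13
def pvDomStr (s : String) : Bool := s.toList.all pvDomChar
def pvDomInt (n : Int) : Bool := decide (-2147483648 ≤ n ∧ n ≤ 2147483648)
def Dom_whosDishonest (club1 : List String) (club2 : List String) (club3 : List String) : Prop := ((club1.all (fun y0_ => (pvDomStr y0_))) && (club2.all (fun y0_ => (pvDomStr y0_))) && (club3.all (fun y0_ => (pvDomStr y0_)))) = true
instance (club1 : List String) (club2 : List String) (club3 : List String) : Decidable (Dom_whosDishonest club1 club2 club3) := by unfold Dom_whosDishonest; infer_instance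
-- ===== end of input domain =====

-- B replaces A's person→club-list dictionary pass with set algebra (union of the three
-- pairwise intersections) followed by one sort; objective: simpler.

-- ===== PORT A =====
-- The output is sorted, so it does not depend on Python's set iteration order; the dict's
-- keys are distinct, so Python's tuple comparison in sorted(memberdict.items()) only ever
-- compares the keys — ported as a stable sort with key = fst.
def whosDishonest (club1 : List String) (club2 : List String) (club3 : List String) : List String :=
  let c1 : PySem.Set String := PySem.Set.ofList club1
  let c2 : PySem.Set String := PySem.Set.ofList club2
  let c3 : PySem.Set String := PySem.Set.ofList club3
  let d1 : PySem.Dict String (List String) :=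
    c1.foldl (fun d person =>
      if d.contains person then d else d.insert person ["club1"]) PySem.Dict.empty
  let d2 : PySem.Dict String (List String) :=
    c2.foldl (fun d person =>
      if d.contains person then d.insert person (d.getD person [] ++ ["club2"])
      else d.insert person ["club2"]) d1
  let d3 : PySem.Dict String (List String) :=
    c3.foldl (fun d person =>
      if d.contains person then d.insert person (d.getD person [] ++ ["club3"])
      else d.insert person ["club3"]) d2
  (PySem.List.sorted d3.items (fun kv => kv.1)).foldl
    (fun blanklist kv => if kv.2.length > 1 then blanklist ++ [kv.1] else blanklist) []

-- ===== PORT B =====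
def whosDishonest_alt (club1 : List String) (club2 : List String) (club3 : List String) : List String :=
  let s1 : PySem.Set String := PySem.Set.ofList club1
  let s2 : PySem.Set String := PySem.Set.ofList club2
  let s3 : PySem.Set String := PySem.Set.ofList club3
  PySem.List.sorted
    (PySem.Set.union (PySem.Set.union (PySem.Set.inter s1 s2) (PySem.Set.inter s1 s3))
      (PySem.Set.inter s2 s3))
    (fun x => x)

-- ===== PRECONDITION & SPEC =====
def Spec_whosDishonest (club1 : List String) (club2 : List String) (club3 : List String) (out : List String) : Prop := out = whosDishonest_alt club1 club2 club3
instance (club1 : List String) (club2 : List String) (club3 : List String) (out : List String) : Decidable (Spec_whosDishonest club1 club2 club3 out) := by unfold Spec_whosDishonest; infer_instance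

-- ===== CLAIM (what is proved, stated in full; the proofs are below) =====
def Claim_equal_whosDishonest : Prop := ∀ (club1 : List String) (club2 : List String) (club3 : List String), Dom_whosDishonest club1 club2 club3 → Spec_whosDishonest club1 club2 club3 (whosDishonest club1 club2 club3)

-- ===== LEMMAS AND PROOFS =====

-- On fresh keys, A's first loop never takes its `contains` branch: it is a plain insert loop.
lemma loop1_eq_insert (l : List String) (d : PySem.Dict String (List String))
    (hl : l.Nodup) (h : ∀ p ∈ l, d.contains p = false) :
    l.foldl (fun d p => if d.contains p then d else d.insert p ["club1"]) d
      = l.foldl (fun d p => d.insert p ["club1"]) d := by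
  induction l generalizing d with
  | nil => rfl
  | cons p t ih =>
    rcases List.nodup_cons.1 hl with ⟨hpt, ht⟩
    have hp : d.contains p = false := h p (by simp)
    simp only [List.foldl_cons]
    rw [if_neg (by simp [hp])]
    apply ih _ ht
    intro q hq
    rw [PySem.Dict.contains_insert]
    have hne : q ≠ p := fun e => hpt (e ▸ hq)
    simp [hne, h q (by simp [hq])]

-- getD after a constant-value insert loop.
lemma getD_foldl_insert_const (l : List String) (d : PySem.Dict String (List String))
    (k : String) (v0 : List String) :
    (l.foldl (fun d p => d.insert p v0) d).getD k []
      = if k ∈ l then v0 else d.getD k [] := by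
  induction l generalizing d with
  | nil => simp
  | cons p t ih =>
    simp only [List.foldl_cons, ih, PySem.Dict.getD_insert]
    by_cases ht : k ∈ t <;> by_cases hp : k = p <;> simp [ht, hp]

-- A's second/third loop body is, for every dict, a `modify … (· ++ [tag])`.
lemma tag_step_eq (t : String) :
    (fun (d : PySem.Dict String (List String)) p =>
      if d.contains p then d.insert p (d.getD p [] ++ [t]) else d.insert p [t])
      = fun d p => d.modify p [] (fun v => v ++ [t]) := by
  funext d p
  by_cases h : d.contains p
  · simp [PySem.Dict.modify, h]
  · have : d.getD p [] = [] := by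
      simp [PySem.Dict.getD,
        (PySem.Dict.get?_eq_none_iff_contains d p).mpr (by simpa using h)]
    simp [PySem.Dict.modify, h, this]

lemma filter_map_tag (l : List String) (t k : String) (hl : l.Nodup) :
    ((l.map (fun p => (p, t))).filter (fun q => q.1 == k)).map (fun q => q.2)
      = if k ∈ l then [t] else [] := by
  induction l with
  | nil => simp
  | cons p r ih =>
    rcases List.nodup_cons.1 hl with ⟨hp, hr⟩
    by_cases hpk : p = k
    · subst hpk
      simp [ih hr, hp]
    · simp [hpk, ih hr, Ne.symm hpk]

-- getD after one tag loop over a duplicate-free list.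
lemma getD_tag_loop (l : List String) (t : String) (d : PySem.Dict String (List String))
    (k : String) (hl : l.Nodup) :
    (l.foldl (fun d p => d.modify p [] (fun v => v ++ [t])) d).getD k []
      = d.getD k [] ++ (if k ∈ l then [t] else []) := by
  have h1 : l.foldl (fun d p => d.modify p [] (fun v => v ++ [t])) d
      = (l.map (fun p => (p, t))).foldl (fun d q => d.modify q.1 [] (fun v => v ++ [q.2])) d := by
    rw [List.foldl_map]
  rw [h1, PySem.Dict.getD_foldl_modify_append, filter_map_tag l t k hl]

-- A's collection loop over the sorted items, in filter/map form.
lemma foldl_collect (l : List (String × List String)) (acc : List String) :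
    l.foldl (fun bl kv => if kv.2.length > 1 then bl ++ [kv.1] else bl) acc
      = acc ++ (l.filter (fun kv => decide (kv.2.length > 1))).map (fun kv => kv.1) := by
  have h := PySem.List.foldl_append_if (fun kv : String × List String => decide (kv.2.length > 1))
    (fun kv => kv.1) l acc
  simpa using h

-- ===== VERDICT (by name: the statement is the Claim_ definition above) =====
theorem whosDishonest_spec : Claim_equal_whosDishonest := by
  intro club1 club2 club3 _
  unfold Spec_whosDishonest
  simp only [whosDishonest, whosDishonest_alt]
  have n1 := PySem.Set.nodup_ofList club1
  have n2 := PySem.Set.nodup_ofList club2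
  have n3 := PySem.Set.nodup_ofList club3
  rw [loop1_eq_insert _ _ n1 (fun p _ => rfl), tag_step_eq "club2", tag_step_eq "club3"]
  set s1 := PySem.Set.ofList club1 with hs1
  set s2 := PySem.Set.ofList club2 with hs2
  set s3 := PySem.Set.ofList club3 with hs3
  set d3 := List.foldl (fun d p => d.modify p [] (fun v => v ++ ["club3"]))
    (List.foldl (fun d p => d.modify p [] (fun v => v ++ ["club2"]))
      (List.foldl (fun d p => d.insert p ["club1"]) PySem.Dict.empty s1) s2) s3 with hd3
  have hkeys : d3.keys = PySem.Set.update (PySem.Set.update (PySem.Set.update [] s1) s2) s3 := by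
    rw [hd3, PySem.Dict.keys_foldl_modify, PySem.Dict.keys_foldl_modify,
      PySem.Dict.keys_foldl_insert]
    rfl
  have hnd : d3.keys.Nodup := by
    rw [hd3]
    exact PySem.Dict.nodup_keys_foldl_modify_key s3 (fun x => x) [] (fun _ _ v => v ++ ["club3"]) _
      (PySem.Dict.nodup_keys_foldl_modify_key s2 (fun x => x) [] (fun _ _ v => v ++ ["club2"]) _
        (PySem.Dict.nodup_keys_foldl_insert s1 (fun _ _ => ["club1"]) _ (by simp [PySem.Dict.empty])))
  have hget : ∀ k, d3.getD k []
      = (if k ∈ s1 then ["club1"] else []) ++ (if k ∈ s2 then ["club2"] else [])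
        ++ (if k ∈ s3 then ["club3"] else []) := by
    intro k
    rw [hd3, getD_tag_loop _ _ _ _ n3, getD_tag_loop _ _ _ _ n2, getD_foldl_insert_const]
    have he : (PySem.Dict.empty : PySem.Dict String (List String)).getD k [] = [] := rfl
    by_cases h1 : k ∈ s1 <;> simp [h1, he]
  rw [PySem.Dict.items_eq_map_keys d3 hnd []]
  rw [foldl_collect]
  simp only [List.nil_append]
  set L := PySem.List.sorted (List.map (fun k => (k, d3.getD k [])) d3.keys)
    (fun kv => kv.1) with hL
  have hfstnd : (L.map (fun kv => kv.1)).Nodup := by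
    have hp : (L.map fun kv => kv.1).Perm
        ((List.map (fun k => (k, d3.getD k [])) d3.keys).map (fun kv => kv.1)) :=
      (PySem.List.sorted_perm _ _ _).map _
    have he : (List.map (fun k => (k, d3.getD k [])) d3.keys).map (fun kv => kv.1) = d3.keys := by
      simp only [List.map_map]
      exact List.map_id' d3.keys
    rw [he] at hp
    exact hp.nodup_iff.2 hnd
  have hle : (L.map (fun kv => kv.1)).Pairwise (· ≤ ·) := PySem.List.sorted_map_key_pairwise _ _
  have hlt : (L.map (fun kv => kv.1)).Pairwise (· < ·) :=
    (hle.and hfstnd).imp (fun h => lt_of_le_of_ne h.1 h.2)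
  have hApair : ((L.filter (fun kv => decide (kv.2.length > 1))).map (fun kv => kv.1)).Pairwise
      (· < ·) := hlt.sublist (List.filter_sublist.map _)
  have hAnd : ((L.filter (fun kv => decide (kv.2.length > 1))).map (fun kv => kv.1)).Nodup :=
    hApair.imp ne_of_lt
  have hndU : (((s1.inter s2).union (s1.inter s3)).union (s2.inter s3)).Nodup :=
    PySem.Set.nodup_union _ _ (PySem.Set.nodup_union _ _ (PySem.Set.nodup_inter _ _ n1))
  have hperm : ((L.filter (fun kv => decide (kv.2.length > 1))).map (fun kv => kv.1)).Perm
      (((s1.inter s2).union (s1.inter s3)).union (s2.inter s3)) := by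
    rw [List.perm_ext_iff_of_nodup hAnd hndU]
    intro a
    simp only [List.mem_map, List.mem_filter, hL, PySem.List.mem_sorted, hkeys, hget,
      PySem.Set.mem_union, PySem.Set.mem_inter, PySem.Set.mem_update, List.not_mem_nil,
      false_or, decide_eq_true_eq]
    constructor
    · rintro ⟨kv, ⟨hkv, hlen⟩, ha⟩
      obtain ⟨k, hk, rfl⟩ := hkv
      subst ha
      by_cases h1 : k ∈ s1 <;> by_cases h2 : k ∈ s2 <;> by_cases h3 : k ∈ s3 <;>
        simp [h1, h2, h3] at hlen ⊢
    · intro h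
      refine ⟨(a, d3.getD a []), ⟨⟨a, ?_, by rw [hget]⟩, ?_⟩, rfl⟩
      · tauto
      · rw [hget]
        rcases h with (⟨h1, h2⟩ | ⟨h1, h3⟩) | ⟨h2, h3⟩ <;>
          by_cases hx1 : a ∈ s1 <;> by_cases hx2 : a ∈ s2 <;> by_cases hx3 : a ∈ s3 <;>
          simp_all
  exact (PySem.List.sorted_eq_of_perm_of_pairwise_lt _ _ _ hperm hApair).symm
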